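-- pv_equiv track=rewrite | github.com/08zhangyi/Some-thing-interesting-for-me | Python生物信息学数据管理/part3/ch12/01.py | evaluate_data
-- ===== SOURCE A (Python) =====
-- def evaluate_data(data, lower=100, upper=300):
--     smaller = 0
--     between = 0
--     bigger = 0
--
--     for length in data:
--         if length < lower:
--             smaller = smaller + 1
--         elif lower < length < upper:
--             between = between + 1
--         elif length > upper:
--             bigger += 1
--     return smaller, between, bigger
-- ===== SOURCE B (Python) =====
-- def evaluate_data(data, lower=100, upper=300):
--     seq = list(data)
--     smaller = sum(1 for x in seq if x < lower)
--     between = sum(1 for x in seq if lower < x < upper)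
--     bigger = sum(1 for x in seq if x > upper)
--     return smaller, between, bigger
-- ===== Notes on version B (the rewrite author's own statement) =====
-- stated objective: idiomatic
-- what changed: Replaces the single loop mutating three counters through an elif chain by three independent sum-over-generator passes with plain strict predicates; Pre_ excludes inverted thresholds (lower > upper), where the elif chain's short-circuit makes A count a value strictly between upper and lower only as smaller while B also counts it as bigger - an unspecified degenerate corner.
-- outside the precondition, e.g. on evaluate_data([200], 300, 100): A returns (1, 0, 0), B returns (1, 0, 1)
import Mathlib
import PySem

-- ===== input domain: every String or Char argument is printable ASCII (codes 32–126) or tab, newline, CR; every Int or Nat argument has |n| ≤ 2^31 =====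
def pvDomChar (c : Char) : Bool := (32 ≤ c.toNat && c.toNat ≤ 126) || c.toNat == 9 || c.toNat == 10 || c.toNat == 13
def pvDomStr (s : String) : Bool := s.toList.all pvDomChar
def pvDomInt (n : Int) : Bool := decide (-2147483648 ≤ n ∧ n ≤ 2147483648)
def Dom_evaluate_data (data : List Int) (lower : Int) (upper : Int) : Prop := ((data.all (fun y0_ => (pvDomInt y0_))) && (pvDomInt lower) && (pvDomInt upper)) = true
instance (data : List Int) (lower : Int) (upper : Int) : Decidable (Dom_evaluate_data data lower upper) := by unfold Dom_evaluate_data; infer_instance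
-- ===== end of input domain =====

-- B counts each bucket as its own sum-over-generator pass with plain strict predicates, instead of A's single loop mutating three counters through an elif chain.


-- ===== PORT A =====
def evaluate_data (data : List Int) (lower : Int) (upper : Int) : Int × Int × Int :=
  let st := data.foldl (fun (st : Int × Int × Int) length =>
      if length < lower then (st.1 + 1, st.2.1, st.2.2)
      else if lower < length ∧ length < upper then (st.1, st.2.1 + 1, st.2.2)
      else if length > upper then (st.1, st.2.1, st.2.2 + 1)
      else st) (0, 0, 0)
  st

-- ===== PORT B =====
-- sum(1 for x in seq if p x)
def pySumOnes (seq : List Int) (p : Int → Bool) : Int :=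
  (seq.filter p).foldl (fun acc _ => acc + 1) 0

def evaluate_data_alt (data : List Int) (lower : Int) (upper : Int) : Int × Int × Int :=
  let seq := data
  let smaller := pySumOnes seq (fun x => x < lower)
  let between := pySumOnes seq (fun x => lower < x && x < upper)
  let bigger := pySumOnes seq (fun x => x > upper)
  (smaller, between, bigger)

-- ===== PRECONDITION & SPEC =====
-- Pre_ excludes inverted thresholds (lower > upper), an unspecified degenerate corner where
-- A's elif chain counts a value strictly between upper and lower only as smaller while B also
-- counts it as bigger; either behaviour is defensible there. A still returns on those inputs.
def Pre_evaluate_data (data : List Int) (lower : Int) (upper : Int) : Prop := lower ≤ upper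
instance (data : List Int) (lower : Int) (upper : Int) : Decidable (Pre_evaluate_data data lower upper) := by unfold Pre_evaluate_data; infer_instance
def pvWitness_evaluate_data : List Int × Int × Int := ([50, 150, 350], 100, 300)

def Spec_evaluate_data (data : List Int) (lower : Int) (upper : Int) (out : Int × Int × Int) : Prop := out = evaluate_data_alt data lower upper
instance (data : List Int) (lower : Int) (upper : Int) (out : Int × Int × Int) : Decidable (Spec_evaluate_data data lower upper out) := by unfold Spec_evaluate_data; infer_instance

-- ===== CLAIM (what is proved, stated in full; the proofs are below) =====
def Claim_equal_evaluate_data : Prop := ∀ (data : List Int) (lower : Int) (upper : Int), Dom_evaluate_data data lower upper → Pre_evaluate_data data lower upper → Spec_evaluate_data data lower upper (evaluate_data data lower upper)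

-- ===== LEMMAS AND PROOFS =====

lemma pySumOnes_foldl (l : List Int) (p : Int → Bool) (a : Int) :
    (l.filter p).foldl (fun acc _ => acc + 1) a = a + ((l.filter p).length : Int) := by
  induction l generalizing a with
  | nil => simp
  | cons x t ih =>
    by_cases h : p x = true <;> simp [h, ih] <;> ring

lemma pySumOnes_cons (x : Int) (t : List Int) (p : Int → Bool) :
    pySumOnes (x :: t) p = (if p x then 1 else 0) + pySumOnes t p := by
  unfold pySumOnes
  by_cases h : p x = true <;> simp [h, pySumOnes_foldl]

lemma evaluate_data_loop (data : List Int) (lower upper : Int) (hlu : lower ≤ upper) (s b g : Int) :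
    data.foldl (fun (st : Int × Int × Int) length =>
      if length < lower then (st.1 + 1, st.2.1, st.2.2)
      else if lower < length ∧ length < upper then (st.1, st.2.1 + 1, st.2.2)
      else if length > upper then (st.1, st.2.1, st.2.2 + 1)
      else st) (s, b, g)
    = (s + pySumOnes data (fun x => x < lower),
       b + pySumOnes data (fun x => lower < x && x < upper),
       g + pySumOnes data (fun x => x > upper)) := by
  induction data generalizing s b g with
  | nil => simp [pySumOnes]
  | cons x t ih =>
    simp only [List.foldl_cons, pySumOnes_cons]
    split_ifs with h1 h2 h3 <;>
      rw [ih] <;>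
      refine Prod.ext ?_ (Prod.ext ?_ ?_) <;>
      simp only [Bool.and_eq_true, decide_eq_true_eq, decide_eq_false_iff_not] at * <;>
      omega

-- ===== VERDICT (by name: the statement is the Claim_ definition above) =====
theorem evaluate_data_spec : Claim_equal_evaluate_data := by
  intro data lower upper _ hpre
  unfold Spec_evaluate_data evaluate_data evaluate_data_alt
  rw [evaluate_data_loop data lower upper hpre 0 0 0]
  simp
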